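-- pv_equiv track=rewrite | github.com/andrewcho-dev/opsconductor-monitor | backend/executors/discovery_executor.py | _identify_vendor
-- ===== SOURCE A (Python) =====
-- from typing import Dict, Any, List
--
-- def _identify_vendor(sys_object_id: str) -> Dict[str, str]:
--     """Identify vendor from sysObjectID."""
--     if not sys_object_id:
--         return {}
--
--     # Common vendor OID prefixes
--     vendor_map = {
--         '1.3.6.1.4.1.9.': {'vendor': 'Cisco'},
--         '1.3.6.1.4.1.2636.': {'vendor': 'Juniper'},
--         '1.3.6.1.4.1.25506.': {'vendor': 'H3C/HPE'},
--         '1.3.6.1.4.1.11.': {'vendor': 'HP'},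
--         '1.3.6.1.4.1.2011.': {'vendor': 'Huawei'},
--         '1.3.6.1.4.1.6527.': {'vendor': 'Nokia/Alcatel-Lucent'},
--         '1.3.6.1.4.1.1991.': {'vendor': 'Brocade/Foundry'},
--         '1.3.6.1.4.1.30065.': {'vendor': 'Arista'},
--         '1.3.6.1.4.1.12356.': {'vendor': 'Fortinet'},
--         '1.3.6.1.4.1.9303.': {'vendor': 'Palo Alto'},
--         '1.3.6.1.4.1.8072.': {'vendor': 'Net-SNMP (Linux)'},
--         '1.3.6.1.4.1.311.': {'vendor': 'Microsoft'},
--         '1.3.6.1.4.1.232.': {'vendor': 'HPE/Compaq'},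
--         '1.3.6.1.4.1.674.': {'vendor': 'Dell'},
--         '1.3.6.1.4.1.2021.': {'vendor': 'UCD-SNMP'},
--     }
--
--     for prefix, info in vendor_map.items():
--         if sys_object_id.startswith(prefix):
--             return info
--
--     return {'vendor': 'Unknown'}
-- ===== SOURCE B (Python) =====
-- _ROOT = '1.3.6.1.4.1.'
-- _ENTERPRISE_VENDORS = {
--     '9': 'Cisco', '2636': 'Juniper', '25506': 'H3C/HPE', '11': 'HP',
--     '2011': 'Huawei', '6527': 'Nokia/Alcatel-Lucent', '1991': 'Brocade/Foundry',
--     '30065': 'Arista', '12356': 'Fortinet', '9303': 'Palo Alto',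
--     '8072': 'Net-SNMP (Linux)', '311': 'Microsoft', '232': 'HPE/Compaq',
--     '674': 'Dell', '2021': 'UCD-SNMP',
-- }
--
-- def _identify_vendor(sys_object_id: str) -> dict:
--     if not sys_object_id:
--         return {}
--     if sys_object_id.startswith(_ROOT):
--         rest = sys_object_id[len(_ROOT):]
--         i = rest.find('.')
--         if i != -1:
--             vendor = _ENTERPRISE_VENDORS.get(rest[:i])
--             if vendor is not None:
--                 return {'vendor': vendor}
--     return {'vendor': 'Unknown'}
-- ===== Notes on version B (the rewrite author's own statement) =====
-- stated objective: idiomatic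
-- what changed: Replaces the 15 sequential startswith tests over full OID prefixes by one shared-root startswith check plus a single dict lookup of the enterprise-number component (the text between the common root '1.3.6.1.4.1.' and the next dot).
import Mathlib
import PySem

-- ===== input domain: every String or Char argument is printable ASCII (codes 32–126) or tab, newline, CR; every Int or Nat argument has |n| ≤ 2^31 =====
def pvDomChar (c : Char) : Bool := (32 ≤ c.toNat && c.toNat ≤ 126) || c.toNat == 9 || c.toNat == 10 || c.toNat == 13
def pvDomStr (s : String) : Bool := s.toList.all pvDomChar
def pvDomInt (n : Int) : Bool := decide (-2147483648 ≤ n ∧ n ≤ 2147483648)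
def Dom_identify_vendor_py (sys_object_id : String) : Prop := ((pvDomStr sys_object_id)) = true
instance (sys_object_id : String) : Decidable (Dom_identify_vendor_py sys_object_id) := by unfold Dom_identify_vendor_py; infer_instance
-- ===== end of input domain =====

-- B replaces A's 15 sequential startswith tests by one shared-root check plus a single
-- dict lookup of the enterprise-number component (idiomatic; same observable result).

-- ===== PORT A =====
-- the for-loop over vendor_map.items() with early return
def pvLoopA (s : String) : List (String × List (String × String)) → List (String × String)
  | [] => [("vendor", "Unknown")]
  | (prefix_, info) :: rest =>
      if PySem.Str.startswith s prefix_ then info else pvLoopA s rest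

def identify_vendor_py (sys_object_id : String) : List (String × String) :=
  if sys_object_id = "" then []
  else
    pvLoopA sys_object_id
      [("1.3.6.1.4.1.9.", [("vendor", "Cisco")]),
       ("1.3.6.1.4.1.2636.", [("vendor", "Juniper")]),
       ("1.3.6.1.4.1.25506.", [("vendor", "H3C/HPE")]),
       ("1.3.6.1.4.1.11.", [("vendor", "HP")]),
       ("1.3.6.1.4.1.2011.", [("vendor", "Huawei")]),
       ("1.3.6.1.4.1.6527.", [("vendor", "Nokia/Alcatel-Lucent")]),
       ("1.3.6.1.4.1.1991.", [("vendor", "Brocade/Foundry")]),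
       ("1.3.6.1.4.1.30065.", [("vendor", "Arista")]),
       ("1.3.6.1.4.1.12356.", [("vendor", "Fortinet")]),
       ("1.3.6.1.4.1.9303.", [("vendor", "Palo Alto")]),
       ("1.3.6.1.4.1.8072.", [("vendor", "Net-SNMP (Linux)")]),
       ("1.3.6.1.4.1.311.", [("vendor", "Microsoft")]),
       ("1.3.6.1.4.1.232.", [("vendor", "HPE/Compaq")]),
       ("1.3.6.1.4.1.674.", [("vendor", "Dell")]),
       ("1.3.6.1.4.1.2021.", [("vendor", "UCD-SNMP")])]

-- ===== PORT B =====
def pvEnterprises : PySem.Dict String String :=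
  PySem.Dict.mk
    [("9", "Cisco"), ("2636", "Juniper"), ("25506", "H3C/HPE"), ("11", "HP"),
     ("2011", "Huawei"), ("6527", "Nokia/Alcatel-Lucent"), ("1991", "Brocade/Foundry"),
     ("30065", "Arista"), ("12356", "Fortinet"), ("9303", "Palo Alto"),
     ("8072", "Net-SNMP (Linux)"), ("311", "Microsoft"), ("232", "HPE/Compaq"),
     ("674", "Dell"), ("2021", "UCD-SNMP")]

def identify_vendor_py_alt (sys_object_id : String) : List (String × String) :=
  if sys_object_id = "" then []
  else if PySem.Str.startswith sys_object_id "1.3.6.1.4.1." then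
    let rest := PySem.Str.slice sys_object_id (some 12) none
    let i := PySem.Str.find rest "."
    if i ≠ -1 then
      match PySem.Dict.get? pvEnterprises (PySem.Str.slice rest none (some i)) with
      | some v => [("vendor", v)]
      | none => [("vendor", "Unknown")]
    else [("vendor", "Unknown")]
  else [("vendor", "Unknown")]

-- ===== PRECONDITION & SPEC =====
def Spec_identify_vendor_py (sys_object_id : String) (out : List (String × String)) : Prop := out = identify_vendor_py_alt sys_object_id
instance (sys_object_id : String) (out : List (String × String)) : Decidable (Spec_identify_vendor_py sys_object_id out) := by unfold Spec_identify_vendor_py; infer_instance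

-- ===== CLAIM (what is proved, stated in full; the proofs are below) =====
def Claim_equal_identify_vendor_py : Prop := ∀ (sys_object_id : String), Dom_identify_vendor_py sys_object_id → Spec_identify_vendor_py sys_object_id (identify_vendor_py sys_object_id)

-- ===== LEMMAS AND PROOFS =====
lemma pv_singleton_prefix {c : Char} {xs : List Char} :
    [c] <+: xs ↔ ∃ t, xs = c :: t := by
  constructor
  · rintro ⟨t, rfl⟩; exact ⟨t, rfl⟩
  · rintro ⟨t, rfl⟩; exact ⟨t, rfl⟩

lemma pv_dot_prefix (r num : List Char) (hnum : '.' ∉ num) :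
    ((num ++ ['.']) <+: r) ↔
      (0 ≤ PySem.Chars.find r ['.'] ∧ r.take (PySem.Chars.find r ['.']).toNat = num) := by
  constructor
  · rintro ⟨t, rfl⟩
    have h0 : 0 ≤ PySem.Chars.find (num ++ ['.'] ++ t) ['.'] :=
      (PySem.Chars.find_nonneg_iff _ _).mpr ⟨num, t, by simp⟩
    obtain ⟨hat, hmin⟩ := PySem.Chars.find_spec h0
    set i := (PySem.Chars.find (num ++ ['.'] ++ t) ['.']).toNat with hi
    have hdropn : (num ++ ['.'] ++ t).drop num.length = '.' :: t := by
      rw [List.append_assoc]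
      simpa using List.drop_left (l₁ := num) (l₂ := ['.'] ++ t)
    have hle : i ≤ num.length := by
      by_contra hlt
      push_neg at hlt
      exact hmin num.length hlt (by rw [hdropn]; exact ⟨t, rfl⟩)
    have hge : num.length ≤ i := by
      by_contra hlt
      push_neg at hlt
      obtain ⟨u, hu⟩ := pv_singleton_prefix.mp hat
      have hgi : (num ++ ['.'] ++ t)[i]? = some '.' := by
        have h := List.getElem?_drop (xs := num ++ ['.'] ++ t) (i := i) (j := 0)
        rw [hu] at h
        simpa using h.symm
      have hmem : '.' ∈ num := by
        rw [List.append_assoc, List.getElem?_append_left (by omega)] at hgi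
        exact List.mem_of_getElem? hgi
      exact hnum hmem
    have hieq : i = num.length := le_antisymm hle hge
    exact ⟨h0, by rw [hieq, List.append_assoc, List.take_left]⟩
  · rintro ⟨h0, htake⟩
    obtain ⟨hat, -⟩ := PySem.Chars.find_spec h0
    obtain ⟨u, hu⟩ := pv_singleton_prefix.mp hat
    refine ⟨u, ?_⟩
    conv_rhs => rw [← List.take_append_drop (PySem.Chars.find r ['.']).toNat r]
    rw [htake, hu]
    simp

lemma pv_sw_false (s p : String)
    (hrp : ("1.3.6.1.4.1." : String).toList <+: p.toList)
    (h : PySem.Str.startswith s "1.3.6.1.4.1." = false) :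
    PySem.Str.startswith s p = false := by
  apply Bool.eq_false_iff.mpr
  intro htrue
  rw [PySem.Str.startswith_eq] at htrue
  have hp2 := (PySem.Chars.startswith_iff _ _).mp htrue
  have hroot : PySem.Str.startswith s "1.3.6.1.4.1." = true := by
    rw [PySem.Str.startswith_eq]
    exact (PySem.Chars.startswith_iff _ _).mpr (hrp.trans hp2)
  rw [h] at hroot
  exact Bool.false_ne_true hroot

lemma pv_sw_pfx (s p num : String) (r : List Char)
    (hl : s.toList = ("1.3.6.1.4.1." : String).toList ++ r)
    (hp : p.toList = ("1.3.6.1.4.1." : String).toList ++ num.toList ++ ['.'])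
    (hnum : '.' ∉ num.toList) :
    PySem.Str.startswith s p =
      (decide (0 ≤ PySem.Chars.find r ['.']) &&
       decide (r.take (PySem.Chars.find r ['.']).toNat = num.toList)) := by
  have key : (p.toList <+: s.toList) ↔
      (0 ≤ PySem.Chars.find r ['.'] ∧ r.take (PySem.Chars.find r ['.']).toNat = num.toList) := by
    rw [hp, hl, List.append_assoc, List.prefix_append_right_inj]
    exact pv_dot_prefix r num.toList hnum
  rw [PySem.Str.startswith_eq, Bool.eq_iff_iff]
  simp only [PySem.Chars.startswith_iff, Bool.and_eq_true, decide_eq_true_eq]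
  exact key

lemma pv_beq_toList (p q : String) : (p == q) = decide (q.toList = p.toList) := by
  rcases eq_or_ne p q with rfl | h
  · simp
  · rw [beq_eq_false_iff_ne.mpr h,
      (decide_eq_false (fun hh => h (String.toList_inj.mp hh).symm) : decide (q.toList = p.toList) = false)]

lemma pvLoopA_all_false (s : String) (l : List (String × List (String × String)))
    (h : ∀ pi ∈ l, PySem.Str.startswith s pi.1 = false) :
    pvLoopA s l = [("vendor", "Unknown")] := by
  induction l with
  | nil => rfl
  | cons e rest ih =>
      obtain ⟨p, info⟩ := e
      rw [pvLoopA, h ⟨p, info⟩ List.mem_cons_self]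
      simp only [Bool.false_eq_true, if_false]
      exact ih fun pi hpi => h pi (List.mem_cons_of_mem _ hpi)

lemma pv_chain (s q : String) (r : List Char)
    (hl : s.toList = ("1.3.6.1.4.1." : String).toList ++ r)
    (h0 : 0 ≤ PySem.Chars.find r ['.'])
    (hq : q.toList = r.take (PySem.Chars.find r ['.']).toNat)
    (L : List (String × String × String))
    (hL : ∀ e ∈ L, e.1.toList = ("1.3.6.1.4.1." : String).toList ++ e.2.1.toList ++ ['.'] ∧
      '.' ∉ e.2.1.toList) :
    pvLoopA s (L.map fun e => (e.1, [("vendor", e.2.2)])) =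
      (match PySem.Dict.get? ⟨L.map fun e => (e.2.1, e.2.2)⟩ q with
       | some v => [("vendor", v)]
       | none => [("vendor", "Unknown")]) := by
  induction L with
  | nil => rfl
  | cons e L ih =>
      obtain ⟨hp, hnum⟩ := hL e List.mem_cons_self
      rw [List.map_cons, pvLoopA, pv_sw_pfx s e.1 e.2.1 r hl hp hnum, List.map_cons,
        PySem.Dict.get?_mk_cons, pv_beq_toList, hq]
      rw [(decide_eq_true h0 : decide (0 ≤ PySem.Chars.find r ['.']) = true), Bool.true_and]
      by_cases hc : r.take (PySem.Chars.find r ['.']).toNat = e.2.1.toList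
      · rw [(decide_eq_true hc : _ = true)]
        rfl
      · rw [(decide_eq_false hc : _ = false)]
        simp only [Bool.false_eq_true, if_false]
        exact ih fun x hx => hL x (List.mem_cons_of_mem _ hx)


-- ===== VERDICT (by name: the statement is the Claim_ definition above) =====
lemma pv_sw_pfx_false (s p num : String) (r : List Char)
    (hl : s.toList = ("1.3.6.1.4.1." : String).toList ++ r)
    (hp : p.toList = ("1.3.6.1.4.1." : String).toList ++ num.toList ++ ['.'])
    (hnum : '.' ∉ num.toList)
    (h0 : ¬ (0 : Int) ≤ PySem.Chars.find r ['.']) :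
    PySem.Str.startswith s p = false := by
  rw [pv_sw_pfx s p num r hl hp hnum, decide_eq_false h0, Bool.false_and]

set_option maxHeartbeats 1000000 in
set_option maxRecDepth 8000 in
theorem identify_vendor_py_spec : Claim_equal_identify_vendor_py := by
  intro s _
  unfold Spec_identify_vendor_py identify_vendor_py identify_vendor_py_alt
  by_cases hs : s = ""
  · rw [if_pos hs, if_pos hs]
  · rw [if_neg hs, if_neg hs]
    cases hroot : PySem.Str.startswith s "1.3.6.1.4.1." with
    | false =>
        refine (pvLoopA_all_false s _ ?_).trans ?_
        · intro pi he
          simp only [List.mem_cons, List.not_mem_nil, or_false] at he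
          rcases he with rfl|rfl|rfl|rfl|rfl|rfl|rfl|rfl|rfl|rfl|rfl|rfl|rfl|rfl|rfl
          all_goals exact pv_sw_false s _ (by decide) hroot
        · rw [if_neg Bool.false_ne_true]
    | true =>
        have hpre : ("1.3.6.1.4.1." : String).toList <+: s.toList := by
          have h := hroot
          rw [PySem.Str.startswith_eq] at h
          exact (PySem.Chars.startswith_iff _ _).mp h
        obtain ⟨r, hr⟩ := hpre
        have hl : s.toList = ("1.3.6.1.4.1." : String).toList ++ r := hr.symm
        have hrest : (PySem.Str.slice s (some 12) none).toList = r := by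
          rw [PySem.Str.toList_slice, PySem.Chars.slice_eq_listSlice,
            PySem.List.slice_from _ (by norm_num), hl]
          simpa using List.drop_left (l₁ := ("1.3.6.1.4.1." : String).toList) (l₂ := r)
        have hfind : PySem.Str.find (PySem.Str.slice s (some 12) none) "." =
            PySem.Chars.find r ['.'] := by
          rw [PySem.Str.find_eq, hrest]
          rfl
        rw [if_pos (rfl : true = true)]
        simp only []
        by_cases h0 : (0 : Int) ≤ PySem.Chars.find r ['.']
        · have hne : PySem.Str.find (PySem.Str.slice s (some 12) none) "." ≠ -1 := by
            rw [hfind]; omega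
          have hq : (PySem.Str.slice (PySem.Str.slice s (some 12) none) none
              (some (PySem.Str.find (PySem.Str.slice s (some 12) none) "."))).toList =
              r.take (PySem.Chars.find r ['.']).toNat := by
            rw [PySem.Str.toList_slice, PySem.Chars.slice_eq_listSlice, hfind,
              PySem.List.slice_to _ h0, hrest]
          have hchain := pv_chain s _ r hl h0 hq
            [("1.3.6.1.4.1.9.", "9", "Cisco"),
             ("1.3.6.1.4.1.2636.", "2636", "Juniper"),
             ("1.3.6.1.4.1.25506.", "25506", "H3C/HPE"),
             ("1.3.6.1.4.1.11.", "11", "HP"),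
             ("1.3.6.1.4.1.2011.", "2011", "Huawei"),
             ("1.3.6.1.4.1.6527.", "6527", "Nokia/Alcatel-Lucent"),
             ("1.3.6.1.4.1.1991.", "1991", "Brocade/Foundry"),
             ("1.3.6.1.4.1.30065.", "30065", "Arista"),
             ("1.3.6.1.4.1.12356.", "12356", "Fortinet"),
             ("1.3.6.1.4.1.9303.", "9303", "Palo Alto"),
             ("1.3.6.1.4.1.8072.", "8072", "Net-SNMP (Linux)"),
             ("1.3.6.1.4.1.311.", "311", "Microsoft"),
             ("1.3.6.1.4.1.232.", "232", "HPE/Compaq"),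
             ("1.3.6.1.4.1.674.", "674", "Dell"),
             ("1.3.6.1.4.1.2021.", "2021", "UCD-SNMP")]
            (by intro e he
                simp only [List.mem_cons, List.not_mem_nil, or_false] at he
                rcases he with rfl|rfl|rfl|rfl|rfl|rfl|rfl|rfl|rfl|rfl|rfl|rfl|rfl|rfl|rfl
                all_goals exact ⟨by decide, by decide⟩)
          simp only [List.map_cons, List.map_nil] at hchain
          rw [if_pos hne]
          unfold pvEnterprises
          exact hchain
        · have hneg : PySem.Str.find (PySem.Str.slice s (some 12) none) "." = -1 := by
            have := PySem.Chars.neg_one_le_find r ['.']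
            rw [hfind]; omega
          rw [if_neg (show ¬ PySem.Str.find (PySem.Str.slice s (some 12) none) "." ≠ -1
            from fun h => h hneg)]
          refine (pvLoopA_all_false s _ ?_).trans rfl
          intro pi he
          simp only [List.mem_cons, List.not_mem_nil, or_false] at he
          rcases he with rfl|rfl|rfl|rfl|rfl|rfl|rfl|rfl|rfl|rfl|rfl|rfl|rfl|rfl|rfl
          · exact pv_sw_pfx_false s _ "9" r hl (by decide) (by decide) h0
          · exact pv_sw_pfx_false s _ "2636" r hl (by decide) (by decide) h0
          · exact pv_sw_pfx_false s _ "25506" r hl (by decide) (by decide) h0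
          · exact pv_sw_pfx_false s _ "11" r hl (by decide) (by decide) h0
          · exact pv_sw_pfx_false s _ "2011" r hl (by decide) (by decide) h0
          · exact pv_sw_pfx_false s _ "6527" r hl (by decide) (by decide) h0
          · exact pv_sw_pfx_false s _ "1991" r hl (by decide) (by decide) h0
          · exact pv_sw_pfx_false s _ "30065" r hl (by decide) (by decide) h0
          · exact pv_sw_pfx_false s _ "12356" r hl (by decide) (by decide) h0
          · exact pv_sw_pfx_false s _ "9303" r hl (by decide) (by decide) h0
          · exact pv_sw_pfx_false s _ "8072" r hl (by decide) (by decide) h0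
          · exact pv_sw_pfx_false s _ "311" r hl (by decide) (by decide) h0
          · exact pv_sw_pfx_false s _ "232" r hl (by decide) (by decide) h0
          · exact pv_sw_pfx_false s _ "674" r hl (by decide) (by decide) h0
          · exact pv_sw_pfx_false s _ "2021" r hl (by decide) (by decide) h0
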